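-- pv_equiv track=rewrite | github.com/univention/univention-corporate-server | base/univention-config-registry/python/univention/debhelper.py | parseRfc822
-- ===== SOURCE A (Python) =====
-- def parseRfc822(f):
-- 	# type: (str) -> List[Dict[str, List[str]]]
-- 	r"""
-- 	Parses string `f` as a :rfc:`822` conforming file and returns list of sections, each a dict mapping keys to lists of values.
-- 	Splits file into multiple sections separated by blank line.
--
-- 	:param f: The messate to parse.
-- 	:returns: A list of dictionaries.
--
-- 	.. note::
-- 		For real Debian files, use the :py:mod:`debian.deb822` module from the `python-debian` package.
--
-- 	>>> res = parseRfc822('Type: file\nFile: /etc/fstab\n\nType: Script\nScript: /bin/false\n')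
-- 	>>> res == [{'Type': ['file'], 'File': ['/etc/fstab']}, {'Type': ['Script'], 'Script': ['/bin/false']}]
-- 	True
-- 	>>> parseRfc822('')
-- 	[]
-- 	>>> parseRfc822('\n')
-- 	[]
-- 	>>> parseRfc822('\n\n')
-- 	[]
-- 	"""
-- 	res = []  # type: List[Dict[str, List[str]]]
-- 	ent = {}  # type: Dict[str, List[str]]
-- 	for line in f.splitlines():
-- 		if line:
-- 			try:
-- 				key, value = line.split(': ', 1)
-- 			except ValueError:
-- 				pass
-- 			else:
-- 				ent.setdefault(key, []).append(value)
-- 		elif ent: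
-- 			res.append(ent)
-- 			ent = {}
-- 	if ent:
-- 		res.append(ent)
-- 	return res
-- ===== SOURCE B (Python) =====
-- def parseRfc822(f):
-- 	# type: (str) -> List[Dict[str, List[str]]]
-- 	"""Block-first rewrite: locate each maximal run of non-empty lines, parse it into a dict, keep non-empty dicts."""
-- 	lines = f.splitlines()
-- 	n = len(lines)
-- 	res = []
-- 	i = 0
-- 	while i < n:
-- 		if not lines[i]:
-- 			i += 1
-- 			continue
-- 		j = i
-- 		while j < n and lines[j]:
-- 			j += 1
-- 		ent = {}
-- 		for line in lines[i:j]: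
-- 			parts = line.split(': ', 1)
-- 			if len(parts) == 2:
-- 				ent.setdefault(parts[0], []).append(parts[1])
-- 		if ent:
-- 			res.append(ent)
-- 		i = j
-- 	return res
-- ===== Notes on version B (the rewrite author's own statement) =====
-- stated objective: alternative
-- what changed: Replaced the single-pass flush-on-blank state machine (mutable current-dict flushed on blank lines and at EOF) by a block-first two-phase computation: an index scan locates each maximal run of non-empty lines, each block is parsed into its own dict, and empty dicts are dropped.
import Mathlib
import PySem

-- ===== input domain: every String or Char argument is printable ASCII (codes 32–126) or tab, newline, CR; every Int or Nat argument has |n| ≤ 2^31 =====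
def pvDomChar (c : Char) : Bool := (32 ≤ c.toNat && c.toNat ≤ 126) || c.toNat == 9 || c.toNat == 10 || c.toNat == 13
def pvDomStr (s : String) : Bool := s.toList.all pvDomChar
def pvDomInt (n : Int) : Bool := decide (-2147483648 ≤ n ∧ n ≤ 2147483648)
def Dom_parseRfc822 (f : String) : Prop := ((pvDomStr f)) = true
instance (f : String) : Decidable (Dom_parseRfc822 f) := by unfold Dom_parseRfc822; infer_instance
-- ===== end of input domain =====

-- B replaces A's single-pass flush-on-blank state machine by a block-first decomposition
-- (find each maximal run of non-empty lines, parse it, keep non-empty dicts); same cost, no speed claim.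

-- ===== PORT A =====
-- dict[str, list[str]] as assoc list; ent.setdefault(key, []).append(value) — overwrite in place, new keys append
def pvEntAddA (ent : List (String × List String)) (key value : String) :
    List (String × List String) :=
  if ent.any (fun p => p.1 == key) then
    ent.map (fun p => if p.1 == key then (p.1, p.2 ++ [value]) else p)
  else ent ++ [(key, [value])]

-- 'try: key, value = line.split(': ', 1) except ValueError: pass else: …'
def pvLineA (ent : List (String × List String)) (line : String) :
    List (String × List String) :=
  match PySem.Str.splitMax? line ": " 1 with
  | some [key, value] => pvEntAddA ent key value
  | _ => ent

def parseRfc822 (f : String) : List (List (String × List String)) :=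
  let r := (PySem.Str.splitlines f).foldl
    (fun (s : List (List (String × List String)) × List (String × List String)) line =>
      if line ≠ "" then (s.1, pvLineA s.2 line)
      else if s.2 ≠ [] then (s.1 ++ [s.2], [])
      else s)
    ([], [])
  if r.2 ≠ [] then r.1 ++ [r.2] else r.1

-- ===== PORT B =====
def pvEntAddB (ent : List (String × List String)) (key value : String) :
    List (String × List String) :=
  if ent.any (fun p => p.1 == key) then
    ent.map (fun p => if p.1 == key then (p.1, p.2 ++ [value]) else p)
  else ent ++ [(key, [value])]

-- 'parts = line.split(': ', 1); if len(parts) == 2: ent.setdefault(parts[0], []).append(parts[1])'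
def pvLineB (ent : List (String × List String)) (line : String) :
    List (String × List String) :=
  let parts := (PySem.Str.splitMax? line ": " 1).getD []
  if parts.length == 2 then pvEntAddB ent (parts.getD 0 "") (parts.getD 1 "") else ent

-- 'ent = {}; for line in lines[i:j]: …'
def pvParseBlock (blk : List String) : List (String × List String) :=
  blk.foldl pvLineB []

-- the outer while loop: skip blank lines, take the maximal run lines[i:j] of non-empty lines,
-- parse it, append the dict if non-empty, continue at j
def pvAltGo : List String → List (List (String × List String))
  | [] => []
  | l :: ls =>
    if l = "" then pvAltGo ls
    else
      let ent := pvParseBlock (l :: ls.takeWhile (fun x => x ≠ ""))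
      (if ent ≠ [] then [ent] else []) ++ pvAltGo (ls.dropWhile (fun x => x ≠ ""))
termination_by ls => ls.length
decreasing_by
  · simp
  · have := List.length_dropWhile_le (fun x : String => decide (x ≠ "")) ls
    simp at this ⊢; omega

def parseRfc822_alt (f : String) : List (List (String × List String)) :=
  pvAltGo (PySem.Str.splitlines f)

-- ===== PRECONDITION & SPEC =====
def Spec_parseRfc822 (f : String) (out : List (List (String × List String))) : Prop := out = parseRfc822_alt f
instance (f : String) (out : List (List (String × List String))) : Decidable (Spec_parseRfc822 f out) := by unfold Spec_parseRfc822; infer_instance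

-- ===== CLAIM (what is proved, stated in full; the proofs are below) =====
def Claim_equal_parseRfc822 : Prop := ∀ (f : String), Dom_parseRfc822 f → Spec_parseRfc822 f (parseRfc822 f)

-- ===== LEMMAS AND PROOFS =====

theorem pvLine_eq (ent : List (String × List String)) (line : String) :
    pvLineA ent line = pvLineB ent line := by
  unfold pvLineA pvLineB pvEntAddA pvEntAddB
  rcases h : PySem.Str.splitMax? line ": " 1 with _ | parts
  · simp [h]
  · rcases parts with _ | ⟨k, _ | ⟨v, _ | _⟩⟩ <;> simp [h, List.getD, List.getElem?_cons_zero]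

-- A's flush-or-parse step
def pvStepA (s : List (List (String × List String)) × List (String × List String))
    (line : String) : List (List (String × List String)) × List (String × List String) :=
  if line ≠ "" then (s.1, pvLineA s.2 line)
  else if s.2 ≠ [] then (s.1 ++ [s.2], [])
  else s

def pvFinish (s : List (List (String × List String)) × List (String × List String)) :
    List (List (String × List String)) :=
  if s.2 ≠ [] then s.1 ++ [s.2] else s.1

-- continuation of B's algorithm with a partially built dict 'ent'
def pvCont (ent : List (String × List String)) :
    List String → List (List (String × List String))
  | [] => if ent ≠ [] then [ent] else []
  | l :: ls =>
    if l = "" then (if ent ≠ [] then [ent] else []) ++ pvAltGo ls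
    else pvCont (pvLineB ent l) ls

theorem pvAltGo_blank (ls : List String) : pvAltGo ("" :: ls) = pvAltGo ls := by
  rw [pvAltGo]; simp

theorem pvAltGo_cons {l : String} (h : l ≠ "") (ls : List String) :
    pvAltGo (l :: ls) =
      (let ent := pvParseBlock (l :: ls.takeWhile (fun x => x ≠ ""));
       (if ent ≠ [] then [ent] else []) ++ pvAltGo (ls.dropWhile (fun x => x ≠ ""))) := by
  rw [pvAltGo]; simp [h]

theorem pvCont_block (lines : List String) :
    ∀ ent, pvCont ent lines =
      (let e := (lines.takeWhile (fun x => x ≠ "")).foldl pvLineB ent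
       (if e ≠ [] then [e] else []) ++ pvAltGo (lines.dropWhile (fun x => x ≠ ""))) := by
  induction lines with
  | nil => intro ent; simp [pvCont, pvAltGo]
  | cons l ls ih =>
    intro ent
    by_cases h : l = ""
    · subst h; simp [pvCont, List.takeWhile, List.dropWhile, pvAltGo_blank]
    · simp [pvCont, h, List.takeWhile, List.dropWhile, ih (pvLineB ent l)]

theorem pvCont_nil_eq_altGo (lines : List String) :
    pvCont [] lines = pvAltGo lines := by
  cases lines with
  | nil => simp [pvCont, pvAltGo]
  | cons l ls =>
    by_cases h : l = ""
    · subst h; simp [pvCont, pvAltGo_blank]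
    · rw [pvCont, if_neg h, pvCont_block, pvAltGo_cons h]
      simp [pvParseBlock, List.foldl_cons]

theorem pvFoldA (lines : List String) :
    ∀ res ent, pvFinish (lines.foldl pvStepA (res, ent)) = res ++ pvCont ent lines := by
  induction lines with
  | nil => intro res ent; simp [pvFinish, pvCont]; split <;> simp_all
  | cons l ls ih =>
    intro res ent
    by_cases h : l = ""
    · subst h
      by_cases he : ent = []
      · subst he
        simp [pvStepA, pvCont, pvCont_nil_eq_altGo, List.foldl_cons, ih]
      · simp [pvStepA, pvCont, he, List.foldl_cons, ih, pvCont_nil_eq_altGo]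
    · simp [pvStepA, pvCont, h, List.foldl_cons, ih, pvLine_eq]

-- ===== VERDICT (by name: the statement is the Claim_ definition above) =====
theorem parseRfc822_spec : Claim_equal_parseRfc822 := by
  intro f _
  show parseRfc822 f = parseRfc822_alt f
  unfold parseRfc822 parseRfc822_alt
  have h := pvFoldA (PySem.Str.splitlines f) [] []
  simp only [pvFinish, pvCont_nil_eq_altGo, List.nil_append] at h
  exact h
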